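-- pv_equiv track=rewrite | github.com/l1mey112/progcomp-crap | iso.py | iso_pattern
-- ===== SOURCE A (Python) =====
-- def iso_pattern(word1):
-- 	code = [0] * len(word1)
--
-- 	for idx1, ch1 in enumerate(word1):
-- 		for nidx1, nch1 in enumerate(word1):
-- 			if nidx1 <= idx1:
-- 				continue
--
-- 			if ch1 == nch1 and code[idx1] == 0:
-- 				code[idx1] = nidx1 - idx1
--
-- 	return code
-- ===== SOURCE B (Python) =====
-- def iso_pattern(word1):
-- 	code = [0] * len(word1)
-- 	last = {}
-- 	for i in range(len(word1) - 1, -1, -1):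
-- 		c = word1[i]
-- 		j = last.get(c)
-- 		if j is not None:
-- 			code[i] = j - i
-- 		last[c] = i
-- 	return code
-- ===== Notes on version B (the rewrite author's own statement) =====
-- stated objective: faster
-- what changed: Replaced the quadratic nested scan over all later indices by a single right-to-left pass that records in a dict the nearest index already seen for each character.
import Mathlib
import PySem

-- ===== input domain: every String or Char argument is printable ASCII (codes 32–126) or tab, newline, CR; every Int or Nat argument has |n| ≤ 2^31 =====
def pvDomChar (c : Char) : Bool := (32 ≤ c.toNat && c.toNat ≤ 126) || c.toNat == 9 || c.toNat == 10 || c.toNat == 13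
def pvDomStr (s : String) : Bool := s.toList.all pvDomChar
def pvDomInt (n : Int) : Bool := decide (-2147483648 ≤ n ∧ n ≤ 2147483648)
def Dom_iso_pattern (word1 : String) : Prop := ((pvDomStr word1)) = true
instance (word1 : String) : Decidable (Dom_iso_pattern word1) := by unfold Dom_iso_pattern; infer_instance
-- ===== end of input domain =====

-- B replaces A's quadratic nested scan by one right-to-left pass with a dict of the nearest
-- index seen so far per character (faster, asymptotic).

-- ===== PORT A =====
-- A's inner loop body: for (nidx1, nch1) = q, skip q.1 ≤ idx1, else set code[idx1] once.
def isoInner (i : Int) (c : Char) (code : List Int) (q : Int × Char) : List Int :=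
  if q.1 ≤ i then code
  else if c = q.2 ∧ PySem.List.pyGetD code i 0 = 0 then
    PySem.List.pySetD code i (q.1 - i)
  else code

def iso_pattern (word1 : String) : List Int :=
  let cs := word1.toList
  let code : List Int := List.replicate cs.length 0
  (PySem.List.enumerate cs 0).foldl
    (fun code p => (PySem.List.enumerate cs 0).foldl (isoInner p.1 p.2) code) code

-- ===== PORT B =====
-- right-to-left pass (the recursion processes the rest of the string first): the dict maps each
-- character to the nearest index at which it occurs to the right of the current position.
def isoAltGo : List Char → Int → (List Int × PySem.Dict Char Int)
  | [], _ => ([], PySem.Dict.empty)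
  | c :: rest, i =>
    let r := isoAltGo rest (i + 1)
    let v : Int := match r.2.get? c with
      | some j => j - i
      | none => 0
    (v :: r.1, r.2.insert c i)

def iso_pattern_alt (word1 : String) : List Int :=
  (isoAltGo word1.toList 0).1

-- ===== PRECONDITION & SPEC =====
def Spec_iso_pattern (word1 : String) (out : List Int) : Prop := out = iso_pattern_alt word1
instance (word1 : String) (out : List Int) : Decidable (Spec_iso_pattern word1 out) := by unfold Spec_iso_pattern; infer_instance

-- ===== CLAIM (what is proved, stated in full; the proofs are below) =====
def Claim_equal_iso_pattern : Prop := ∀ (word1 : String), Dom_iso_pattern word1 → Spec_iso_pattern word1 (iso_pattern word1)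

-- ===== LEMMAS AND PROOFS =====

-- distance from position k to the next occurrence of the same character (0 if none)
def tgtVal (cs : List Char) (k : Nat) : Int :=
  match (cs.drop (k+1)).findIdx? (fun d => decide (cs.getD k ' ' = d)) with
  | some j => (j : Int) + 1
  | none => 0

-- the common specification list, structurally
def isoNext : List Char → List Int
  | [] => []
  | c :: rest =>
    (match rest.findIdx? (fun d => decide (c = d)) with
     | some j => (j : Int) + 1
     | none => 0) :: isoNext rest

theorem length_isoNext (cs : List Char) : (isoNext cs).length = cs.length := by
  induction cs with
  | nil => rfl
  | cons c rest ih => simp [isoNext, ih]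

theorem isoNext_getD (cs : List Char) (j : Nat) (hj : j < cs.length) :
    (isoNext cs).getD j 0 = tgtVal cs j := by
  induction cs generalizing j with
  | nil => simp at hj
  | cons c rest ih =>
    cases j with
    | zero => simp [isoNext, tgtVal]
    | succ j =>
      simp only [isoNext, List.getD_cons_succ]
      rw [ih j (by simpa using hj)]
      simp [tgtVal]

-- ---- B side ----

theorem altGo_get? (cs : List Char) (i : Int) (c : Char) :
    (isoAltGo cs i).2.get? c
      = (cs.findIdx? (fun d => decide (c = d))).map (fun k => i + (k : Int)) := by
  induction cs generalizing i with
  | nil => simp [isoAltGo, PySem.Dict.empty, PySem.Dict.get?]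
  | cons c0 rest ih =>
    simp only [isoAltGo, PySem.Dict.get?_insert, List.findIdx?_cons]
    by_cases h : c = c0
    · subst h; simp
    · have h' : (decide (c = c0)) = false := by simp [h]
      rw [if_neg h, h', ih (i + 1)]
      cases hr : rest.findIdx? (fun d => decide (c = d)) <;> simp [hr] <;> push_cast <;> ring

theorem altGo_fst (cs : List Char) (i : Int) : (isoAltGo cs i).1 = isoNext cs := by
  induction cs generalizing i with
  | nil => rfl
  | cons c rest ih =>
    simp only [isoAltGo, isoNext, ih (i + 1)]
    rw [altGo_get? rest (i + 1) c]
    cases hr : rest.findIdx? (fun d => decide (c = d)) <;> simp [hr] <;> push_cast <;> ring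

-- ---- A side: inner loop ----

theorem inner_pos (l : List (Int × Char)) (i : Int) (c : Char) (code : List Int)
    (h : PySem.List.pyGetD code i 0 ≠ 0) :
    l.foldl (isoInner i c) code = code := by
  induction l with
  | nil => rfl
  | cons q l ih =>
    have hq : isoInner i c code q = code := by
      unfold isoInner
      split
      · rfl
      · rw [if_neg (by tauto)]
    simp [List.foldl_cons, hq, ih]

theorem inner_zero (l : List (Int × Char)) (i : Int) (c : Char) (code : List Int)
    (hi0 : 0 ≤ i) (hil : i < (code.length : Int))
    (h0 : PySem.List.pyGetD code i 0 = 0) :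
    l.foldl (isoInner i c) code =
      (l.find? (fun q => !decide (q.1 ≤ i) && decide (c = q.2))).elim code
        (fun q => PySem.List.pySetD code i (q.1 - i)) := by
  induction l with
  | nil => rfl
  | cons q l ih =>
    by_cases hq : q.1 ≤ i
    · have hs : isoInner i c code q = code := by unfold isoInner; rw [if_pos hq]
      simp [List.foldl_cons, hs, List.find?_cons, hq, ih]
    · by_cases hc : c = q.2
      · have hstep : isoInner i c code q = PySem.List.pySetD code i (q.1 - i) := by
          unfold isoInner; rw [if_neg hq, if_pos ⟨hc, h0⟩]
        have hset : PySem.List.pySetD code i (q.1 - i) = code.set i.toNat (q.1 - i) :=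
          PySem.List.pySetD_of_nonneg _ _ hi0
        have hlen : i.toNat < code.length := by omega
        have hval : PySem.List.pyGetD (PySem.List.pySetD code i (q.1 - i)) i 0 = q.1 - i := by
          rw [hset, PySem.List.pyGetD_eq_getElem _ 0 hi0 (by simp; omega)]
          simp [List.getElem_set_self (i := i.toNat)]
        have hne : PySem.List.pyGetD (PySem.List.pySetD code i (q.1 - i)) i 0 ≠ 0 := by
          rw [hval]; omega
        rw [List.foldl_cons, hstep, inner_pos _ _ _ _ hne, List.find?_cons]
        have hp : (!decide (q.1 ≤ i) && decide (c = q.2)) = true := by simp [hq, hc]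
        rw [hp]
        rfl
      · have hs : isoInner i c code q = code := by
          unfold isoInner; rw [if_neg hq, if_neg (by tauto)]
        rw [List.foldl_cons, hs, ih, List.find?_cons]
        have hp : (!decide (q.1 ≤ i) && decide (c = q.2)) = false := by simp [hc]
        rw [hp]

theorem find_enum (c : Char) (cs : List Char) : ∀ (s i : Int), i < s →
    ((PySem.List.enumerate cs s).find? (fun q => !decide (q.1 ≤ i) && decide (c = q.2))).map Prod.fst
      = (cs.findIdx? (fun d => decide (c = d))).map (fun k => s + (k : Int)) := by
  induction cs with
  | nil => intro s i h; simp [PySem.List.enumerate_nil]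
  | cons c0 rest ih =>
    intro s i h
    rw [PySem.List.enumerate_cons, List.find?_cons, List.findIdx?_cons]
    have hsi : (decide (s ≤ i)) = false := by simp; omega
    by_cases hc : c = c0
    · simp [hsi, hc]
    · have hc' : (decide (c = c0)) = false := by simp [hc]
      simp only [hsi, hc', Bool.not_false, Bool.true_and, Bool.and_false, if_neg]
      rw [ih (s + 1) i (by omega)]
      cases hr : rest.findIdx? (fun d => decide (c = d)) <;> simp [hr] <;> push_cast <;> ring

theorem find_enum_full (cs : List Char) (k : Nat) (hk : k < cs.length) (c : Char) :
    ((PySem.List.enumerate cs 0).find? (fun q => !decide (q.1 ≤ (k : Int)) && decide (c = q.2))).map Prod.fst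
      = ((cs.drop (k+1)).findIdx? (fun d => decide (c = d))).map (fun j => (k : Int) + 1 + (j : Int)) := by
  conv_lhs => rw [← List.take_append_drop (k+1) cs]
  rw [PySem.List.enumerate_append, List.find?_append]
  have hnone : (PySem.List.enumerate (cs.take (k+1)) 0).find?
      (fun q => !decide (q.1 ≤ (k : Int)) && decide (c = q.2)) = none := by
    rw [List.find?_eq_none]
    intro x hx
    obtain ⟨j, hj, rfl⟩ := (PySem.List.mem_enumerate_iff _ _ _).1 hx
    have hjk : j < k + 1 := by
      have h2 := hj
      simp [List.length_take] at h2
      omega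
    have hle : ((0 : Int) + (j : Int) ≤ (k : Int)) := by push_cast; omega
    simp [hle]
    exact fun h => absurd h (by omega)
  rw [hnone]
  have hlen : (cs.take (k+1)).length = k + 1 := by simp [List.length_take]; omega
  have hfe := find_enum c (cs.drop (k+1)) ((0 : Int) + ((cs.take (k+1)).length : Int)) k
    (by rw [hlen]; push_cast; omega)
  simp only [Option.none_or]
  rw [hfe, hlen]
  cases hr : (cs.drop (k+1)).findIdx? (fun d => decide (c = d)) <;> simp <;> push_cast <;> ring

theorem inner_full (cs : List Char) (code : List Int) (k : Nat) (hk : k < cs.length)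
    (hlen : code.length = cs.length) (h0 : PySem.List.pyGetD code (k : Int) 0 = 0) :
    (PySem.List.enumerate cs 0).foldl (isoInner (k : Int) (cs.getD k ' ')) code
      = code.set k (tgtVal cs k) := by
  rw [inner_zero _ _ _ _ (by positivity) (by push_cast; omega) h0]
  have hfind := find_enum_full cs k hk (cs.getD k ' ')
  unfold tgtVal
  cases hq : (PySem.List.enumerate cs 0).find?
      (fun q => !decide (q.1 ≤ (k : Int)) && decide (cs.getD k ' ' = q.2)) with
  | none =>
    rw [hq] at hfind
    cases hr : (cs.drop (k+1)).findIdx? (fun d => decide (cs.getD k ' ' = d)) with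
    | none =>
      have hz : code.getD k 0 = 0 := by
        simpa [PySem.List.pyGetD_natCast] using h0
      have hk' : k < code.length := by omega
      rw [List.getD_eq_getElem _ _ hk'] at hz
      simp [hr, ← hz, List.set_getElem_self]
    | some j => rw [hr] at hfind; simp at hfind
  | some q =>
    rw [hq] at hfind
    cases hr : (cs.drop (k+1)).findIdx? (fun d => decide (cs.getD k ' ' = d)) with
    | none => rw [hr] at hfind; simp at hfind
    | some j =>
      rw [hr] at hfind
      simp at hfind
      have hv : q.1 - (k : Int) = (j : Int) + 1 := by omega
      simp only [Option.elim_some, hv, hr]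
      rw [PySem.List.pySetD_natCast]

theorem outer_char (cs : List Char) (l : List Char) : ∀ (m : Nat) (code : List Int),
    cs.drop m = l → code.length = cs.length →
    (∀ j, m ≤ j → j < cs.length → code.getD j 0 = 0) →
    (((PySem.List.enumerate l (m : Int)).foldl
        (fun code p => (PySem.List.enumerate cs 0).foldl (isoInner p.1 p.2) code) code).length = cs.length) ∧
    (∀ j, j < cs.length →
      ((PySem.List.enumerate l (m : Int)).foldl
        (fun code p => (PySem.List.enumerate cs 0).foldl (isoInner p.1 p.2) code) code).getD j 0
        = if j < m then code.getD j 0 else tgtVal cs j) := by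
  induction l with
  | nil =>
    intro m code hdrop hlen hz
    have hm : cs.length ≤ m := by
      by_contra h
      have : cs.drop m ≠ [] := by
        apply List.ne_nil_of_length_pos; simp; omega
      exact this hdrop
    rw [PySem.List.enumerate_nil]
    exact ⟨hlen, fun j hj => by rw [if_pos (by omega)]; rfl⟩
  | cons c0 rest ih =>
    intro m code hdrop hlen hz
    have hm : m < cs.length := by
      by_contra h
      rw [List.drop_eq_nil_of_le (by omega)] at hdrop; exact (List.cons_ne_nil _ _) hdrop.symm
    have hc0 : cs.getD m ' ' = c0 := by
      rw [List.getD_eq_getElem _ _ hm]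
      have : (cs.drop m)[0]'(by rw [hdrop]; simp) = c0 := by simp [hdrop]
      rw [List.getElem_drop] at this
      simpa using this
    have hrest : cs.drop (m + 1) = rest := by
      rw [← List.tail_drop, hdrop]
      rfl

    rw [PySem.List.enumerate_cons, List.foldl_cons]
    have h0 : PySem.List.pyGetD code (m : Int) 0 = 0 := by
      rw [PySem.List.pyGetD_natCast]; exact hz m le_rfl hm
    have hstep : (PySem.List.enumerate cs 0).foldl (isoInner (m : Int) c0) code
        = code.set m (tgtVal cs m) := by
      rw [← hc0]; exact inner_full cs code m hm hlen h0
    rw [hstep]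
    have hlen1 : (code.set m (tgtVal cs m)).length = cs.length := by simp [hlen]
    have hz1 : ∀ j, m + 1 ≤ j → j < cs.length → (code.set m (tgtVal cs m)).getD j 0 = 0 := by
      intro j hj hjn
      rw [List.getD_eq_getElem _ _ (by omega), List.getElem_set_ne (by omega),
        ← List.getD_eq_getElem _ _ (by omega)]
      exact hz j (by omega) hjn
    have hcast : ((m : Int) + 1) = ((m + 1 : Nat) : Int) := by push_cast; ring
    rw [hcast]
    obtain ⟨ihl, ihv⟩ := ih (m + 1) (code.set m (tgtVal cs m)) hrest hlen1 hz1
    refine ⟨ihl, fun j hj => ?_⟩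
    rw [ihv j hj]
    by_cases hjm : j < m
    · rw [if_pos (by omega), if_pos hjm,
        List.getD_eq_getElem _ _ (by omega), List.getElem_set_ne (by omega),
        ← List.getD_eq_getElem _ _ (by omega)]
    · by_cases hjm' : j = m
      · subst hjm'
        rw [if_pos (by omega), if_neg (by omega),
          List.getD_eq_getElem _ _ (by omega), List.getElem_set_self (by omega)]
      · rw [if_neg (by omega), if_neg (by omega)]

theorem iso_pattern_eq_isoNext (w : String) : iso_pattern w = isoNext w.toList := by
  have hdef : iso_pattern w = (PySem.List.enumerate w.toList 0).foldl
      (fun code p => (PySem.List.enumerate w.toList 0).foldl (isoInner p.1 p.2) code)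
      (List.replicate w.toList.length 0) := rfl
  rw [hdef]
  set cs := w.toList with hcs
  have h := outer_char cs cs 0 (List.replicate cs.length 0) (by simp) (by simp)
    (by intro j _ hj; simp)
  simp only [Nat.cast_zero] at h
  obtain ⟨hlen, hval⟩ := h
  apply List.ext_getElem (by rw [hlen, length_isoNext])
  intro i h1 h2
  have hi : i < cs.length := by omega
  have := hval i hi
  rw [if_neg (by omega)] at this
  rw [← List.getD_eq_getElem _ _ h1, this, ← isoNext_getD cs i hi,
    List.getD_eq_getElem _ _ h2]

-- ===== VERDICT (by name: the statement is the Claim_ definition above) =====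
theorem iso_pattern_spec : Claim_equal_iso_pattern := by
  intro w _
  unfold Spec_iso_pattern iso_pattern_alt
  rw [iso_pattern_eq_isoNext, altGo_fst]
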